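-- pv_equiv track=rewrite | github.com/JieWangnk/AortaCFD-Mesh | mesh_optim/point_in_mesh.py | _center_out_indices
-- ===== SOURCE A (Python) =====
-- from typing import List, Tuple, Dict, Optional, Union
--
-- def _center_out_indices(n: int) -> List[int]:
--     """
--     Generate indices that go from center outward.
--
--     Args:
--         n: Number of indices
--
--     Returns:
--         List of indices starting from center
--     """
--     center = n // 2
--     indices = [center]
--     for i in range(1, n):
--         if center + i < n:
--             indices.append(center + i)
--         if center - i >= 0:
--             indices.append(center - i)
--     return indices
-- ===== SOURCE B (Python) =====
-- from typing import List
--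
--
-- def _center_out_indices(n: int) -> List[int]:
--     """Indices from the center outward: sort the non-center indices by an
--     integer distance key (upper index wins ties over lower)."""
--     center = n // 2
--     rest = [i for i in range(n) if i != center]
--     rest.sort(key=lambda i: 2 * (i - center) if i > center else 2 * (center - i) + 1)
--     return [center] + rest
-- ===== Notes on version B (the rewrite author's own statement) =====
-- stated objective: alternative
-- what changed: B builds the list of non-center indices and sorts them with an integer distance key that ranks an upper index just before the equally distant lower one, replacing A's counter loop with two bound guards per iteration by a filter-then-sort formulation.
import Mathlib
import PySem

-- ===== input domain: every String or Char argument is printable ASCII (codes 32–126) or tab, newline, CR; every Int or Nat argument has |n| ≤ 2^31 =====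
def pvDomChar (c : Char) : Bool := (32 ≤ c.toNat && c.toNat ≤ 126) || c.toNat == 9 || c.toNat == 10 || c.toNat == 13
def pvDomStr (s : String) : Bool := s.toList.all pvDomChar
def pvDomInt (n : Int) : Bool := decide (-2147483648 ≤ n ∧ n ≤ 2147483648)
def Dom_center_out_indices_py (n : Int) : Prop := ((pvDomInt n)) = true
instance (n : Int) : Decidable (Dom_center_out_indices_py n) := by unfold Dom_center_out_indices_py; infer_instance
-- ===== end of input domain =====

-- B filters out the center and sorts the remaining indices by an integer
-- distance key, instead of A's counter loop with two guards; alternative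
-- formulation, not claimed faster.

-- ===== PORT A =====
def center_out_indices_py (n : Int) : List Int :=
  let center := PySem.Int.floordiv n 2
  (PySem.List.pyRange 1 n 1).foldl
    (fun acc i =>
      let acc := if center + i < n then acc ++ [center + i] else acc
      if 0 ≤ center - i then acc ++ [center - i] else acc)
    [center]

-- ===== PORT B =====
def center_out_indices_py_alt (n : Int) : List Int :=
  let center := PySem.Int.floordiv n 2
  let rest := (PySem.List.pyRange 0 n 1).filter (fun i => i != center)
  center :: PySem.List.sorted rest
    (fun i => if center < i then 2 * (i - center) else 2 * (center - i) + 1) false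

-- ===== PRECONDITION & SPEC =====
def Spec_center_out_indices_py (n : Int) (out : List Int) : Prop := out = center_out_indices_py_alt n
instance (n : Int) (out : List Int) : Decidable (Spec_center_out_indices_py n out) := by unfold Spec_center_out_indices_py; infer_instance

-- ===== CLAIM (what is proved, stated in full; the proofs are below) =====
def Claim_equal_center_out_indices_py : Prop := ∀ (n : Int), Dom_center_out_indices_py n → Spec_center_out_indices_py n (center_out_indices_py n)

-- ===== LEMMAS AND PROOFS =====

/-- Interleaving of two lists, first list's element first; the longer tail survives. -/
def pvInterleave : List Int → List Int → List Int
  | [], d => d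
  | u, [] => u
  | a :: u, b :: d => a :: b :: pvInterleave u d

lemma pvInterleave_nil_right (u : List Int) : pvInterleave u [] = u := by
  cases u <;> rfl

lemma pvInterleave_perm (u : List Int) : ∀ d : List Int, (pvInterleave u d).Perm (u ++ d) := by
  induction u with
  | nil => intro d; simp [pvInterleave]
  | cons a u ih =>
    intro d
    cases d with
    | nil => simp [pvInterleave_nil_right]
    | cons b d =>
      simp only [pvInterleave, List.cons_append]
      refine (List.Perm.cons a ?_)
      exact ((ih d).cons b).trans List.perm_middle.symm

lemma mem_pvInterleave {x : Int} {u d : List Int} :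
    x ∈ pvInterleave u d ↔ x ∈ u ∨ x ∈ d := by
  rw [(pvInterleave_perm u d).mem_iff, List.mem_append]

/-- A's guarded loop over `range(i, i+m)` produces the interleaving of the two
remaining runs, provided the `m` iterations exhaust both runs. -/
lemma pvLoopA_eq (c n : Int) (m : Nat) : ∀ (i : Int),
    n - c ≤ i + m → c < i + m → ∀ (acc : List Int),
    (PySem.List.pyRange i (i + m) 1).foldl
      (fun acc j =>
        if 0 ≤ c - j then (if c + j < n then acc ++ [c + j] else acc) ++ [c - j]
        else if c + j < n then acc ++ [c + j] else acc) acc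
    = acc ++ pvInterleave (PySem.List.pyRange (c + i) n 1)
        (PySem.List.pyRange (c - i) (-1) (-1)) := by
  induction m with
  | zero =>
    intro i h1 h2 acc
    rw [PySem.List.pyRange_one_eq_nil (by omega),
        PySem.List.pyRange_one_eq_nil (by omega : n ≤ c + i),
        PySem.List.pyRange_neg_one_eq_nil (by omega : c - i ≤ -1)]
    simp [pvInterleave]
  | succ m ih =>
    intro i h1 h2 acc
    rw [PySem.List.pyRange_one_cons (by omega : i < i + (m + 1 : Nat))]
    simp only [List.foldl_cons]
    have harg : i + 1 + (m : Int) = i + ((m + 1 : Nat) : Int) := by push_cast; omega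
    have ih' := ih (i + 1) (by omega) (by omega)
    by_cases hu : c + i < n <;> by_cases hd : 0 ≤ c - i
    · rw [PySem.List.pyRange_one_cons (by omega : c + i < n),
          PySem.List.pyRange_neg_one_cons (by omega : -1 < c - i)]
      simp only [hu, hd, if_pos]
      rw [harg] at ih'
      rw [ih' (acc ++ [c + i] ++ [c - i])]
      have e1 : c + (i + 1) = c + i + 1 := by ring
      have e2 : c - (i + 1) = c - i - 1 := by ring
      rw [e1, e2] at ih'
      simp [pvInterleave, e1, e2]
    · rw [PySem.List.pyRange_one_cons (by omega : c + i < n),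
          PySem.List.pyRange_neg_one_eq_nil (by omega : c - i ≤ -1)]
      simp only [hu, if_pos, if_neg (by omega : ¬ 0 ≤ c - i)]
      rw [harg] at ih'
      rw [ih' (acc ++ [c + i])]
      have e1 : c + (i + 1) = c + i + 1 := by ring
      rw [e1, PySem.List.pyRange_neg_one_eq_nil (by omega : c - (i + 1) ≤ -1)] at ih'
      simp [pvInterleave_nil_right, e1,
            PySem.List.pyRange_neg_one_eq_nil (by omega : c - (i + 1) ≤ -1)]
    · rw [PySem.List.pyRange_one_eq_nil (by omega : n ≤ c + i),
          PySem.List.pyRange_neg_one_cons (by omega : -1 < c - i)]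
      simp only [if_neg (by omega : ¬ c + i < n), if_pos hd]
      rw [harg] at ih'
      rw [ih' (acc ++ [c - i])]
      have e2 : c - (i + 1) = c - i - 1 := by ring
      rw [e2, PySem.List.pyRange_one_eq_nil (by omega : n ≤ c + (i + 1))] at ih'
      simp [pvInterleave, e2,
            PySem.List.pyRange_one_eq_nil (by omega : n ≤ c + (i + 1))]
    · rw [PySem.List.pyRange_one_eq_nil (by omega : n ≤ c + i),
          PySem.List.pyRange_neg_one_eq_nil (by omega : c - i ≤ -1)]
      simp only [if_neg (by omega : ¬ c + i < n), if_neg (by omega : ¬ 0 ≤ c - i)]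
      rw [harg] at ih'
      have ih'' := ih' acc
      rw [PySem.List.pyRange_one_eq_nil (by omega : n ≤ c + (i + 1)),
          PySem.List.pyRange_neg_one_eq_nil (by omega : c - (i + 1) ≤ -1)] at ih''
      simpa [pvInterleave] using ih''

/-- B's distance key is strictly increasing along the interleaving of the runs. -/
lemma pvInter_pairwise (c n : Int) (m : Nat) : ∀ (i : Int), 1 ≤ i →
    n - c ≤ i + m → c < i + m →
    (pvInterleave (PySem.List.pyRange (c + i) n 1) (PySem.List.pyRange (c - i) (-1) (-1))).Pairwise
      (fun a b => (if c < a then 2 * (a - c) else 2 * (c - a) + 1)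
                < (if c < b then 2 * (b - c) else 2 * (c - b) + 1)) := by
  induction m with
  | zero =>
    intro i _ h1 h2
    rw [PySem.List.pyRange_one_eq_nil (by omega : n ≤ c + i),
        PySem.List.pyRange_neg_one_eq_nil (by omega : c - i ≤ -1)]
    simp [pvInterleave]
  | succ m ih =>
    intro i hi h1 h2
    have e1 : c + (i + 1) = c + i + 1 := by ring
    have e2 : c - (i + 1) = c - i - 1 := by ring
    have ih' := ih (i + 1) (by omega) (by omega) (by omega)
    rw [e1, e2] at ih'
    have keybound : ∀ x, x ∈ pvInterleave (PySem.List.pyRange (c + i + 1) n 1)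
        (PySem.List.pyRange (c - i - 1) (-1) (-1)) →
        2 * (i + 1) ≤ (if c < x then 2 * (x - c) else 2 * (c - x) + 1) := by
      intro x hx
      rcases mem_pvInterleave.mp hx with hx | hx
      · have := (PySem.List.mem_pyRange_one).mp hx
        have : c + i + 1 ≤ x := this.1
        rw [if_pos (by omega)]; omega
      · have := (PySem.List.mem_pyRange_neg_one).mp hx
        have : x ≤ c - i - 1 := this.2
        rw [if_neg (by omega)]; omega
    by_cases hu : c + i < n <;> by_cases hd : 0 ≤ c - i
    · rw [PySem.List.pyRange_one_cons (by omega : c + i < n),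
          PySem.List.pyRange_neg_one_cons (by omega : -1 < c - i)]
      simp only [pvInterleave]
      refine List.Pairwise.cons ?_ (List.Pairwise.cons ?_ ih')
      · intro b hb
        rw [List.mem_cons] at hb
        rw [if_pos (by omega : c < c + i)]
        rcases hb with rfl | hb
        · rw [if_neg (by omega)]; omega
        · have := keybound b hb; omega
      · intro b hb
        have := keybound b hb
        rw [if_neg (by omega : ¬ c < c - i)]; omega
    · rw [PySem.List.pyRange_one_cons (by omega : c + i < n),
          PySem.List.pyRange_neg_one_eq_nil (by omega : c - i ≤ -1)]
      have hnil : PySem.List.pyRange (c - i - 1) (-1) (-1) = [] :=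
        PySem.List.pyRange_neg_one_eq_nil (by omega)
      rw [hnil, pvInterleave_nil_right] at ih' keybound
      cases hup : PySem.List.pyRange (c + i + 1) n 1 with
      | nil => simp [pvInterleave]
      | cons y ys =>
        rw [hup] at ih' keybound
        simp only [pvInterleave]
        refine List.Pairwise.cons ?_ ih'
        intro b hb
        have := keybound b hb
        rw [if_pos (by omega : c < c + i)]; omega
    · rw [PySem.List.pyRange_one_eq_nil (by omega : n ≤ c + i),
          PySem.List.pyRange_neg_one_cons (by omega : -1 < c - i)]
      have hnil : PySem.List.pyRange (c + i + 1) n 1 = [] :=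
        PySem.List.pyRange_one_eq_nil (by omega)
      rw [hnil] at ih' keybound
      simp only [pvInterleave]
      refine List.Pairwise.cons ?_ ih'
      intro b hb
      have := keybound b hb
      rw [if_neg (by omega : ¬ c < c - i)]; omega
    · rw [PySem.List.pyRange_one_eq_nil (by omega : n ≤ c + i),
          PySem.List.pyRange_neg_one_eq_nil (by omega : c - i ≤ -1)]
      simp [pvInterleave]

/-- The interleaving of the two runs is a permutation of the filtered range. -/
lemma pvInter_perm_rest (c n : Int) (hc : c = n / 2) :
    (pvInterleave (PySem.List.pyRange (c + 1) n 1)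
        (PySem.List.pyRange (c - 1) (-1) (-1))).Perm
      ((PySem.List.pyRange 0 n 1).filter (fun i => i != c)) := by
  by_cases hn : 1 ≤ n
  · have hc0 : 0 ≤ c := by omega
    have hcn : c < n := by omega
    have hsplit : PySem.List.pyRange 0 n 1
        = PySem.List.pyRange 0 c 1 ++ PySem.List.pyRange c n 1 :=
      PySem.List.pyRange_one_append 0 c n hc0 (by omega)
    have hcons : PySem.List.pyRange c n 1 = c :: PySem.List.pyRange (c + 1) n 1 :=
      PySem.List.pyRange_one_cons hcn
    have hlowfilter : (PySem.List.pyRange 0 c 1).filter (fun i => i != c)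
        = PySem.List.pyRange 0 c 1 := by
      apply List.filter_eq_self.mpr
      intro x hx
      have := (PySem.List.mem_pyRange_one).mp hx
      simp only [bne_iff_ne, ne_eq]
      omega
    have hupfilter : (PySem.List.pyRange (c + 1) n 1).filter (fun i => i != c)
        = PySem.List.pyRange (c + 1) n 1 := by
      apply List.filter_eq_self.mpr
      intro x hx
      have := (PySem.List.mem_pyRange_one).mp hx
      simp only [bne_iff_ne, ne_eq]
      omega
    have hrest : (PySem.List.pyRange 0 n 1).filter (fun i => i != c)
        = PySem.List.pyRange 0 c 1 ++ PySem.List.pyRange (c + 1) n 1 := by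
      rw [hsplit, hcons, List.filter_append, hlowfilter, List.filter_cons]
      simp [hupfilter]
    have hdown : PySem.List.pyRange (c - 1) (-1) (-1)
        = (PySem.List.pyRange 0 c 1).reverse := by
      have e : c - 1 + 1 = c := by ring
      rw [PySem.List.pyRange_neg_one_eq_reverse, e]
      norm_num
    rw [hrest, hdown]
    exact ((pvInterleave_perm _ _).trans
        ((List.reverse_perm _).append_left _)).trans List.perm_append_comm
  · rw [PySem.List.pyRange_one_eq_nil (by omega : n ≤ c + 1),
        PySem.List.pyRange_neg_one_eq_nil (by omega : c - 1 ≤ -1),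
        PySem.List.pyRange_one_eq_nil (by omega : n ≤ 0)]
    simp [pvInterleave]

-- ===== VERDICT (by name: the statement is the Claim_ definition above) =====
theorem center_out_indices_py_spec : Claim_equal_center_out_indices_py := by
  intro n _
  unfold Spec_center_out_indices_py center_out_indices_py center_out_indices_py_alt
  simp only []
  set c := PySem.Int.floordiv n 2 with hc
  have hdiv : c = n / 2 := by
    rw [hc, PySem.Int.floordiv_eq_ediv_of_pos (by omega)]
  have hrange : PySem.List.pyRange 1 n 1 = PySem.List.pyRange 1 (1 + ((n - 1).toNat : Int)) 1 := by
    by_cases h : n ≤ 1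
    · rw [PySem.List.pyRange_one_eq_nil h, PySem.List.pyRange_one_eq_nil (by omega)]
    · congr 1; omega
  rw [hrange, pvLoopA_eq c n (n - 1).toNat 1 (by omega) (by omega) [c]]
  have hsorted : PySem.List.sorted ((PySem.List.pyRange 0 n 1).filter (fun i => i != c))
      (fun i => if c < i then 2 * (i - c) else 2 * (c - i) + 1) false
      = pvInterleave (PySem.List.pyRange (c + 1) n 1)
          (PySem.List.pyRange (c - 1) (-1) (-1)) := by
    apply PySem.List.sorted_eq_of_perm_of_pairwise_lt
    · exact pvInter_perm_rest c n hdiv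
    · exact pvInter_pairwise c n (n - 1).toNat 1 le_rfl (by omega) (by omega)
  rw [hsorted]
  rfl
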